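-- pv_equiv track=rewrite | github.com/European-XFEL/Karabo | src/pythonGui/karabogui/graph/plots/utils.py | _get_sample_threshold
-- ===== SOURCE A (Python) =====
-- _TYPICAL_POINTS = 20000
--
-- _DIMENSION_DOWNSAMPLE = [
--     (200000, 30000),
--     (300000, 40000),
--     (400000, 50000),
--     (500000, 60000),
-- ]
--
-- def _get_sample_threshold(size: int):
--     """Calculate the downsample factor based on data size,
--     typically every 10th data point."""
--     threshold = _TYPICAL_POINTS
--     for d_size, d_points in _DIMENSION_DOWNSAMPLE:
--         if size > d_size:
--             threshold = d_points
--         else: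
--             # No need to look further!
--             break
--
--     return threshold
-- ===== SOURCE B (Python) =====
-- from bisect import bisect_left
--
-- _BOUNDARIES = [200000, 300000, 400000, 500000]
-- _THRESHOLDS = [20000, 30000, 40000, 50000, 60000]
--
-- def _get_sample_threshold(size: int):
--     """Calculate the downsample factor based on data size,
--     typically every 10th data point."""
--     return _THRESHOLDS[bisect_left(_BOUNDARIES, size)]
-- ===== Notes on version B (the rewrite author's own statement) =====
-- stated objective: idiomatic
-- what changed: Replaced the linear scan over (boundary, threshold) pairs with early break by a bisect_left binary search into a boundaries table indexing a parallel thresholds table; strict '>' in A matches bisect_left's tie rule (boundary values stay in the lower bracket).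
import Mathlib
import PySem

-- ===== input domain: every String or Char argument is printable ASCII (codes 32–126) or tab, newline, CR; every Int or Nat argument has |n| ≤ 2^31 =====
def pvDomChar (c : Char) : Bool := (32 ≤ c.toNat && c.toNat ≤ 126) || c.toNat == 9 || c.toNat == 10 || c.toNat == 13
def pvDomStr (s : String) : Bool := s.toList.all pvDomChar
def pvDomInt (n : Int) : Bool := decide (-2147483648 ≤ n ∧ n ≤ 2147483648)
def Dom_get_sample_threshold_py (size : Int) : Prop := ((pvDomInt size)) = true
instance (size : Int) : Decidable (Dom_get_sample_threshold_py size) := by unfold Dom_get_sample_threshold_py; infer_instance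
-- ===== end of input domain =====

-- B replaces A's linear scan-with-break by an indexed lookup: the bracket index is computed with bisect_left into parallel boundary/threshold tables (idiomatic).


-- ===== PORT A =====
-- literal transliteration of A: fold over the table with early break
def pvLoopA (size : Int) : List (Int × Int) → Int → Int
  | [], threshold => threshold
  | (d_size, d_points) :: rest, threshold =>
    if size > d_size then pvLoopA size rest d_points
    else threshold  -- break: no need to look further

def get_sample_threshold_py (size : Int) : Int :=
  pvLoopA size [(200000, 30000), (300000, 40000), (400000, 50000), (500000, 60000)] 20000

-- ===== PORT B =====
-- B: bisect_left(boundaries, size) = number of boundaries strictly below size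
def get_sample_threshold_py_alt (size : Int) : Int :=
  let boundaries : List Int := [200000, 300000, 400000, 500000]
  let thresholds : List Int := [20000, 30000, 40000, 50000, 60000]
  thresholds.getD (boundaries.countP (fun b => decide (b < size))) 0

-- ===== PRECONDITION & SPEC =====
def Spec_get_sample_threshold_py (size : Int) (out : Int) : Prop := out = get_sample_threshold_py_alt size
instance (size : Int) (out : Int) : Decidable (Spec_get_sample_threshold_py size out) := by unfold Spec_get_sample_threshold_py; infer_instance

-- ===== CLAIM (what is proved, stated in full; the proofs are below) =====
def Claim_equal_get_sample_threshold_py : Prop := ∀ (size : Int), Dom_get_sample_threshold_py size → Spec_get_sample_threshold_py size (get_sample_threshold_py size)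

-- ===== LEMMAS AND PROOFS =====

-- ===== VERDICT (by name: the statement is the Claim_ definition above) =====
theorem get_sample_threshold_py_spec : Claim_equal_get_sample_threshold_py := by
  intro size _
  unfold Spec_get_sample_threshold_py get_sample_threshold_py get_sample_threshold_py_alt
  simp only [pvLoopA, List.countP, List.countP.go, gt_iff_lt]
  by_cases h1 : (200000:Int) < size <;> by_cases h2 : (300000:Int) < size <;>
    by_cases h3 : (400000:Int) < size <;> by_cases h4 : (500000:Int) < size <;>
    simp [h1, h2, h3, h4] <;> omega
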